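-- pv_equiv track=rewrite | github.com/easyhutu/py_uifish | uifish/tools/parse_json.py | _can_path
-- ===== SOURCE A (Python) =====
-- def _can_path(a: list, b: list):
--     if a[-1] == b[-1]:
--         c = []
--         a.reverse()
--         for idx, i in enumerate(a):
--             if i in b:
--                 c.append(i)
--         c.reverse()
--         if c[-len(b):] == b:
--             return True
--     return
-- ===== SOURCE B (Python) =====
-- def _can_path(a: list, b: list):
--     if a[-1] == b[-1]:
--         a.reverse()
--         bset = set(b)
--         k = len(b)
--         for x in a:
--             if x in bset:
--                 if k == 0:
--                     break
--                 if x != b[k - 1]: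
--                     return
--                 k -= 1
--         if k == 0:
--             return True
--     return
-- ===== Notes on version B (the rewrite author's own statement) =====
-- stated objective: alternative
-- what changed: A builds the full filtered list, reverses it and compares its last-len(b) slice with b; B builds no intermediate list at all: it keeps a single backward index k into b and matches each in-b element of the reversed a against b[k-1], returning early on the first mismatch and breaking once k hits 0.
import Mathlib
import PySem

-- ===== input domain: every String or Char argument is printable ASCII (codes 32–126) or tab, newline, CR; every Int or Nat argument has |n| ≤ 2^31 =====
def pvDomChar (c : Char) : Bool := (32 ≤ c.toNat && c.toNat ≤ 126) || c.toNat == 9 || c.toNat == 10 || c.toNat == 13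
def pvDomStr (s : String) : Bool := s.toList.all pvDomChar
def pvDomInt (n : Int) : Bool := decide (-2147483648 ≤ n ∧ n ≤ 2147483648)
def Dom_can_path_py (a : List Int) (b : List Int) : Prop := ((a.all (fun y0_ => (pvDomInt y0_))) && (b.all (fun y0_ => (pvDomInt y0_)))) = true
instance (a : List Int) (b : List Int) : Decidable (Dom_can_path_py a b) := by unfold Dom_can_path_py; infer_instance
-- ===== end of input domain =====

-- B replaces A's build-full-filtered-list / reverse / suffix-slice comparison by index matching: a
-- single backward pointer k into b checked element by element over the reversed a, with no
-- intermediate list (alternative decomposition; same return values).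
-- Both A and B mutate the argument a in place via a.reverse(); the equivalence proved is about the
-- RETURN value (both perform the identical mutation).

-- ===== PORT A =====
def can_path_py (a : List Int) (b : List Int) : Option Bool :=
  match PySem.List.pyGet? a (-1), PySem.List.pyGet? b (-1) with
  | some la, some lb =>
    if la = lb then
      -- c = []; a.reverse(); for idx, i in enumerate(a): if i in b: c.append(i)
      let ar := a.reverse
      let c := (PySem.List.enumerate ar).foldl
        (fun c p => if p.2 ∈ b then c ++ [p.2] else c) []
      -- c.reverse()
      let c2 := c.reverse
      -- if c[-len(b):] == b: return True
      if PySem.List.slice c2 (some (-(b.length : Int))) none = b then some true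
      else none
    else none
  | _, _ => none   -- IndexError on empty a or b (excluded by Pre_)

-- ===== PORT B =====
-- Source B's for-loop over the reversed a with the backward pointer k into b.
-- Result: none = the early bare `return` (mismatch); some k = loop finished (or broke) with final k.
-- The index b[k-1] is only evaluated when 1 ≤ k ≤ len b, so pyGet? is always `some` there; `.getD 0`
-- only discharges the Option (the default is unreachable).
def pvMatch (b : List Int) (bset : PySem.Set Int) : List Int → Nat → Option Nat
  | [], k => some k
  | x :: xs, k =>
    if PySem.Set.contains bset x then
      if k = 0 then some 0          -- break
      else if x ≠ (PySem.List.pyGet? b ((k : Int) - 1)).getD 0 then none   -- return (None)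
      else pvMatch b bset xs (k - 1)
    else pvMatch b bset xs k

def can_path_py_alt (a : List Int) (b : List Int) : Option Bool :=
  match PySem.List.pyGet? a (-1) with
  | none => none   -- IndexError (excluded by Pre_)
  | some la =>
    match PySem.List.pyGet? b (-1) with
    | none => none
    | some lb =>
      if la = lb then
        let ar := a.reverse
        let bset := PySem.Set.ofList b
        match pvMatch b bset ar b.length with
        | none => none
        | some k => if k = 0 then some true else none
      else none

-- ===== PRECONDITION & SPEC =====
-- A raises IndexError (a[-1] / b[-1]) on an empty a or b; exactly those inputs are excluded.
def Pre_can_path_py (a : List Int) (b : List Int) : Prop := a ≠ [] ∧ b ≠ []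
instance (a : List Int) (b : List Int) : Decidable (Pre_can_path_py a b) := by unfold Pre_can_path_py; infer_instance
def pvWitness_can_path_py : List Int × List Int := ([1, 2, 3], [2, 3])

def Spec_can_path_py (a : List Int) (b : List Int) (out : Option Bool) : Prop := out = can_path_py_alt a b
instance (a : List Int) (b : List Int) (out : Option Bool) : Decidable (Spec_can_path_py a b out) := by unfold Spec_can_path_py; infer_instance

-- ===== CLAIM (what is proved, stated in full; the proofs are below) =====
def Claim_equal_can_path_py : Prop := ∀ (a : List Int) (b : List Int), Dom_can_path_py a b → Pre_can_path_py a b → Spec_can_path_py a b (can_path_py a b)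

-- ===== LEMMAS AND PROOFS =====

-- A's enumerate-loop builds the filtered list (the index is unused).
theorem pv_foldl_enum_filter (b : List Int) (l acc : List Int) (s : Int) :
    (PySem.List.enumerate l s).foldl (fun c p => if p.2 ∈ b then c ++ [p.2] else c) acc
      = acc ++ l.filter (· ∈ b) := by
  induction l generalizing acc s with
  | nil => simp [PySem.List.enumerate_nil]
  | cons x xs ih =>
    simp only [PySem.List.enumerate_cons, List.foldl_cons, List.filter_cons]
    by_cases hx : x ∈ b <;> simp [hx, ih]

-- A's suffix-slice test, rephrased on the un-reversed filtered list.
theorem pv_slice_iff (f : List Int) (b : List Int) (hb : 0 < b.length) :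
    (PySem.List.slice f.reverse (some (-(b.length : Int))) none = b)
      ↔ (f.take b.length = b.reverse) := by
  rw [PySem.List.slice_from_neg_natCast _ _ hb]
  constructor
  · intro h
    have : (f.reverse.drop (f.reverse.length - b.length)).reverse = b.reverse := by rw [h]
    rw [← this]
    simp [List.reverse_drop]
    omega
  · intro h
    have : f.take b.length = (f.reverse.drop (f.reverse.length - b.length)).reverse := by
      simp [List.reverse_drop]
      omega
    rw [this] at h
    have := congrArg List.reverse h
    simpa using this

-- B's pointer loop succeeds (final k = 0, no early return) exactly when the first k in-b elements
-- of l spell (b.take k).reverse.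
theorem pv_match_eq (b : List Int) (l : List Int) (k : Nat) (hk : k ≤ b.length) :
    (pvMatch b (PySem.Set.ofList b) l k = some 0)
      ↔ (l.filter (· ∈ b)).take k = (b.take k).reverse := by
  induction l generalizing k with
  | nil =>
    simp only [pvMatch, List.filter_nil, List.take_nil, Option.some.injEq]
    rw [eq_comm (b := (b.take k).reverse), List.reverse_eq_nil_iff, List.take_eq_nil_iff]
    constructor
    · intro h; exact Or.inl h
    · rintro (h | h)
      · exact h
      · subst h; simpa using hk
  | cons x xs ih =>
    simp only [pvMatch]
    by_cases hx : x ∈ b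
    · have hc : PySem.Set.contains (PySem.Set.ofList b) x = true := by
        rw [PySem.Set.contains_iff, PySem.Set.mem_ofList]; exact hx
      rw [if_pos hc, List.filter_cons_of_pos (by simpa using hx)]
      by_cases hk0 : k = 0
      · subst hk0; simp
      · obtain ⟨j, rfl⟩ : ∃ j, k = j + 1 := ⟨k - 1, by omega⟩
        have hlt : j < b.length := by omega
        have hidx : (PySem.List.pyGet? b (((j + 1 : Nat) : Int) - 1)).getD 0 = b[j] := by
          have h1 : ((j + 1 : Nat) : Int) - 1 = ((j : Nat) : Int) := by omega
          rw [h1, PySem.List.pyGet?_natCast]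
          simp [List.getElem?_eq_getElem hlt]
        have htake : b.take (j + 1) = b.take j ++ [b[j]] := by
          rw [List.take_add_one, List.getElem?_eq_getElem hlt]; simp
        rw [if_neg hk0, hidx, htake, List.take_succ_cons, List.reverse_append,
          List.reverse_singleton, List.singleton_append]
        by_cases hxe : x = b[j]
        · simp only [hxe, ne_eq, not_true_eq_false, if_false, Nat.add_sub_cancel]
          rw [ih j (by omega)]
          constructor
          · intro h; rw [h]
          · intro h; exact (List.cons_inj_right _).mp h
        · rw [if_pos hxe]
          constructor
          · intro h; exact absurd h (by simp)
          · intro h; exact absurd (List.head_eq_of_cons_eq h) hxe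
    · rw [if_neg (by simpa using hx), List.filter_cons_of_neg (by simpa using hx)]
      exact ih k hk

-- ===== VERDICT (by name: the statement is the Claim_ definition above) =====
theorem can_path_py_spec : Claim_equal_can_path_py := by
  intro a b _ hpre
  obtain ⟨ha, hb⟩ := hpre
  unfold Spec_can_path_py can_path_py can_path_py_alt
  obtain ⟨la, hla⟩ := Option.isSome_iff_exists.mp (List.getLast?_isSome.mpr ha)
  obtain ⟨lb, hlb⟩ := Option.isSome_iff_exists.mp (List.getLast?_isSome.mpr hb)
  rw [PySem.List.pyGet?_neg_one, PySem.List.pyGet?_neg_one, hla, hlb]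
  by_cases heq : la = lb
  · simp only [if_pos heq]
    have hblen : 0 < b.length := List.length_pos_iff.mpr hb
    rw [pv_foldl_enum_filter]
    simp only [List.nil_append]
    have hbtake : b.take b.length = b := List.take_length ..
    by_cases hcond : (a.reverse.filter (· ∈ b)).take b.length = b.reverse
    · rw [if_pos ((pv_slice_iff _ b hblen).mpr hcond)]
      have : pvMatch b (PySem.Set.ofList b) a.reverse b.length = some 0 :=
        (pv_match_eq b a.reverse b.length le_rfl).mpr (by rw [hbtake]; exact hcond)
      rw [this]
      simp
    · rw [if_neg (fun h => hcond ((pv_slice_iff _ b hblen).mp h))]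
      cases hm : pvMatch b (PySem.Set.ofList b) a.reverse b.length with
      | none => rfl
      | some k =>
        by_cases hk : k = 0
        · subst hk
          exact absurd ((pv_match_eq b a.reverse b.length le_rfl).mp hm)
            (by rw [hbtake]; exact hcond)
        · simp [hk]
  · simp only [if_neg heq]
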